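-- pv_equiv track=rewrite | github.com/00life/project | project/imports_lp/list_parser.py | final_indexes1
-- ===== SOURCE A (Python) =====
-- def final_indexes1(target_indexes,space_indexes,input_space):
--
--     final_indexes2 = []
--     for index in target_indexes:
--         count = 0
--         temp_indexes = []
--         for space in space_indexes:
--             if input_space > 0:
--                 if space > index-1:
--                     temp_indexes.append(space)
--                     count+=1
--                     if count >= abs(input_space):
--                         break
--             else:
--                 if space < index:
--                     temp_indexes.append(space)
--                     count+=1
--                     if count >= abs(input_space):
--                         break
--
--         final_indexes2.append(temp_indexes[-1])
--
--     return final_indexes2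
-- ===== SOURCE B (Python) =====
-- def final_indexes1(target_indexes, space_indexes, input_space):
--     # One streaming pass over space_indexes, advancing the (count, answer) state of
--     # every target simultaneously, instead of a separate scan per target.
--     k = max(abs(input_space), 1)
--     state = [(t, 0, None) for t in target_indexes]
--     for s in space_indexes:
--         state = [(t, c + 1, s) if c < k and (s >= t if input_space > 0 else s < t)
--                  else (t, c, a)
--                  for (t, c, a) in state]
--     return [a for (_, _, a) in state]
-- ===== Notes on version B (the rewrite author's own statement) =====
-- stated objective: alternative
-- what changed: Transposes the loop nest: instead of A's separate scan of space_indexes per target with an early break, B makes a single streaming pass over space_indexes, advancing a (count, answer) state for all targets simultaneously and reading the answers off at the end.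
import Mathlib
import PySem

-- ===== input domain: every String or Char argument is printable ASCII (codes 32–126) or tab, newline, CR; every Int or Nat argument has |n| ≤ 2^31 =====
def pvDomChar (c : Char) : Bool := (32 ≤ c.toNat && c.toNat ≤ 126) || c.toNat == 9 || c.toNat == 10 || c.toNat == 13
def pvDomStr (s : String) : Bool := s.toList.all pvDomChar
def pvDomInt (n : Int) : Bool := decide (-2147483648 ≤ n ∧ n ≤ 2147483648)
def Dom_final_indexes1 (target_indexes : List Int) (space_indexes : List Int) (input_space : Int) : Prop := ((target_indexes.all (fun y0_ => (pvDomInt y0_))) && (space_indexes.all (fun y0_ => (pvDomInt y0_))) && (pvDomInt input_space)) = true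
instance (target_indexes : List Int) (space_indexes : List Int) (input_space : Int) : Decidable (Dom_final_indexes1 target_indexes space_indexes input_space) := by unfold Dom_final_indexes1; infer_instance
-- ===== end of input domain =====

-- B transposes A's loop nest: one streaming pass over space_indexes advancing a
-- (count, answer) state for every target simultaneously (objective: alternative).


-- ===== PORT A =====
def innerLoopA (input_space index : Int) : List Int → Int → List Int → List Int
  | [], _, temp => temp
  | space :: rest, count, temp =>
    if input_space > 0 then
      if space > index - 1 then
        if count + 1 ≥ |input_space| then temp ++ [space]
        else innerLoopA input_space index rest (count + 1) (temp ++ [space])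
      else innerLoopA input_space index rest count temp
    else
      if space < index then
        if count + 1 ≥ |input_space| then temp ++ [space]
        else innerLoopA input_space index rest (count + 1) (temp ++ [space])
      else innerLoopA input_space index rest count temp

def final_indexes1 (target_indexes : List Int) (space_indexes : List Int) (input_space : Int) : List Int :=
  target_indexes.foldl (fun final_indexes2 index =>
    let temp_indexes := innerLoopA input_space index space_indexes 0 []
    final_indexes2 ++ [(PySem.List.pyGet? temp_indexes (-1)).getD 0]) []

-- ===== PORT B =====
-- per-space update of one target's (target, count, answer) entry (the comprehension body)
def stepB (input_space k s : Int) (p : Int × Int × Option Int) : Int × Int × Option Int :=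
  if p.2.1 < k ∧ (if input_space > 0 then s ≥ p.1 else s < p.1) then (p.1, p.2.1 + 1, some s)
  else p

def final_indexes1_alt (target_indexes : List Int) (space_indexes : List Int) (input_space : Int) : List Int :=
  ((space_indexes.foldl (fun st s => st.map (stepB input_space (max |input_space| 1) s))
      (target_indexes.map (fun t => (t, (0 : Int), (none : Option Int))))).map
    (fun p => p.2.2.getD 0))  -- under Pre_ the option is always some; getD totalizes Python's None

-- ===== PRECONDITION & SPEC =====
-- Pre_ excludes exactly the inputs on which Python A raises IndexError: some target has no
-- qualifying space (no space ≥ t when input_space > 0, no space < t otherwise), so temp_indexes[-1] fails.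
def Pre_final_indexes1 (target_indexes : List Int) (space_indexes : List Int) (input_space : Int) : Prop :=
  ∀ t ∈ target_indexes, ∃ s ∈ space_indexes, if input_space > 0 then s ≥ t else s < t
instance (target_indexes : List Int) (space_indexes : List Int) (input_space : Int) : Decidable (Pre_final_indexes1 target_indexes space_indexes input_space) := by unfold Pre_final_indexes1; infer_instance
def pvWitness_final_indexes1 : List Int × List Int × Int := ([3, 1], [0, 2, 4], 2)
def Spec_final_indexes1 (target_indexes : List Int) (space_indexes : List Int) (input_space : Int) (out : List Int) : Prop := out = final_indexes1_alt target_indexes space_indexes input_space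
instance (target_indexes : List Int) (space_indexes : List Int) (input_space : Int) (out : List Int) : Decidable (Spec_final_indexes1 target_indexes space_indexes input_space out) := by unfold Spec_final_indexes1; infer_instance

-- ===== CLAIM (what is proved, stated in full; the proofs are below) =====
def Claim_equal_final_indexes1 : Prop := ∀ (target_indexes : List Int) (space_indexes : List Int) (input_space : Int), Dom_final_indexes1 target_indexes space_indexes input_space → Pre_final_indexes1 target_indexes space_indexes input_space → Spec_final_indexes1 target_indexes space_indexes input_space (final_indexes1 target_indexes space_indexes input_space)

-- ===== LEMMAS AND PROOFS =====

-- the elements of spaces that qualify for target t, with A's comparison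
def qFilt (input_space t : Int) (spaces : List Int) : List Int :=
  spaces.filter (fun s => if input_space > 0 then decide (s > t - 1) else decide (s < t))

-- same list, with B's comparison
def qFiltB (input_space t : Int) (spaces : List Int) : List Int :=
  spaces.filter (fun s => if input_space > 0 then decide (s ≥ t) else decide (s < t))

lemma qFilt_eq_qFiltB (input_space t : Int) (spaces : List Int) :
    qFilt input_space t spaces = qFiltB input_space t spaces := by
  unfold qFilt qFiltB
  apply List.filter_congr; intro s _
  by_cases hpos : input_space > 0
  · simp only [if_pos hpos, decide_eq_decide]; omega
  · simp [hpos]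

lemma innerA_eq (input_space t : Int) : ∀ (spaces temp : List Int) (c : Int),
    c = (temp.length : Int) → (temp.length : Int) < max |input_space| 1 →
    innerLoopA input_space t spaces c temp =
      temp ++ (qFilt input_space t spaces).take ((max |input_space| 1).toNat - temp.length) := by
  intro spaces
  induction spaces with
  | nil => intro temp c hc _; simp [innerLoopA, qFilt]
  | cons s rest ih =>
    intro temp c hc hlt
    have hK : ((max |input_space| 1).toNat : Int) = max |input_space| 1 := by
      have : (0:Int) ≤ max |input_space| 1 := le_trans (by norm_num) (le_max_right _ _)
      omega
    by_cases hpos : input_space > 0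
    · by_cases hq : s > t - 1
      · by_cases hbrk : c + 1 ≥ |input_space|
        · have hone : (max |input_space| 1).toNat - temp.length = 1 := by omega
          simp only [innerLoopA, if_pos hpos, if_pos hbrk, qFilt, hone,
            List.filter_cons, hq]
          simp
        · have h1 : c + 1 = ((temp ++ [s]).length : Int) := by simp; omega
          have h2 : ((temp ++ [s]).length : Int) < max |input_space| 1 := by simp; omega
          have hrec := ih (temp ++ [s]) (c + 1) h1 h2
          have htk : (max |input_space| 1).toNat - temp.length
              = ((max |input_space| 1).toNat - (temp.length + 1)) + 1 := by omega
          simp only [innerLoopA, if_pos hpos, if_neg hbrk, hrec, qFilt,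
            List.filter_cons, hq, htk]
          simp
      · have hrec := ih temp c hc hlt
        simp only [innerLoopA, if_pos hpos, hrec, qFilt, List.filter_cons, hq]
        simp
    · by_cases hq : s < t
      · by_cases hbrk : c + 1 ≥ |input_space|
        · have hone : (max |input_space| 1).toNat - temp.length = 1 := by omega
          simp only [innerLoopA, if_neg hpos, if_pos hbrk, qFilt, hone,
            List.filter_cons, hq]
          simp
        · have h1 : c + 1 = ((temp ++ [s]).length : Int) := by simp; omega
          have h2 : ((temp ++ [s]).length : Int) < max |input_space| 1 := by simp; omega
          have hrec := ih (temp ++ [s]) (c + 1) h1 h2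
          have htk : (max |input_space| 1).toNat - temp.length
              = ((max |input_space| 1).toNat - (temp.length + 1)) + 1 := by omega
          simp only [innerLoopA, if_neg hpos, if_neg hbrk, hrec, qFilt,
            List.filter_cons, hq, htk]
          simp
      · have hrec := ih temp c hc hlt
        simp only [innerLoopA, if_neg hpos, hrec, qFilt, List.filter_cons, hq]
        simp

-- folding a map-step over a list of independent states = mapping the per-state fold
lemma foldl_map_comm {α β : Type} (g : β → α → α) :
    ∀ (l : List β) (st : List α),
      l.foldl (fun st s => st.map (g s)) st = st.map (fun x => l.foldl (fun x s => g s x) x) := by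
  intro l
  induction l with
  | nil => intro st; simp
  | cons s rest ih =>
    intro st
    simp only [List.foldl_cons, ih, List.map_map]
    rfl

-- characterization of B's per-target fold
lemma foldB_char (input_space t k : Int) (hk : k = max |input_space| 1) :
    ∀ (spaces : List Int) (c : Int) (a : Option Int), 0 ≤ c → c ≤ k →
    spaces.foldl (fun x s => stepB input_space k s x) (t, c, a)
      = (t, min k (c + ((qFiltB input_space t spaces).length : Int)),
          if (qFiltB input_space t spaces).take (k - c).toNat = [] then a
          else ((qFiltB input_space t spaces).take (k - c).toNat).getLast?) := by
  intro spaces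
  induction spaces with
  | nil =>
    intro c a h0 hck
    simp only [List.foldl_nil, qFiltB, List.filter_nil, List.length_nil, Nat.cast_zero,
      List.take_nil]
    rw [show min k (c + (0:Int)) = c from by omega]
    simp
  | cons s rest ih =>
    intro c a h0 hck
    have hq : qFiltB input_space t (s :: rest)
        = (if (if input_space > 0 then decide (s ≥ t) else decide (s < t)) = true
           then s :: qFiltB input_space t rest else qFiltB input_space t rest) := by
      simp [qFiltB, List.filter_cons]
    by_cases hQ : (if input_space > 0 then decide (s ≥ t) else decide (s < t)) = true
    · -- s qualifies
      by_cases hc : c < k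
      · have hstep : stepB input_space k s (t, c, a) = (t, c + 1, some s) := by
          simp only [stepB]
          rw [if_pos]
          constructor
          · exact hc
          · by_cases hpos : input_space > 0 <;> simp_all
        have hrec := ih (c + 1) (some s) (by omega) (by omega)
        have hkc : (k - c).toNat = (k - (c + 1)).toNat + 1 := by omega
        rw [List.foldl_cons, hstep, hrec, hq, if_pos hQ]
        have hlen : min k (c + 1 + ((qFiltB input_space t rest).length : Int))
            = min k (c + ((s :: qFiltB input_space t rest).length : Int)) := by
          simp; omega
        rw [hlen, hkc]
        simp only [List.take_succ_cons]
        by_cases hemp : (qFiltB input_space t rest).take (k - (c + 1)).toNat = []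
        · simp [hemp]
        · simp only [if_neg hemp]
          have hne' : (List.take (k - (c + 1)).toNat (qFiltB input_space t rest)).getLast? ≠ none := by
            rw [Ne, List.getLast?_eq_none_iff]; exact hemp
          obtain ⟨y, hy⟩ := Option.ne_none_iff_exists'.mp hne'
          rw [hy]
          simp [List.getLast?_cons, hy]
      · -- c = k: state frozen
        have hstep : stepB input_space k s (t, c, a) = (t, c, a) := by
          simp only [stepB]; rw [if_neg]; intro ⟨h1, _⟩; exact hc h1
        have hrec := ih c a h0 hck
        have hkc : (k - c).toNat = 0 := by omega
        rw [List.foldl_cons, hstep, hrec, hq, if_pos hQ, hkc]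
        simp only [List.take_zero]
        have hlnn := Int.natCast_nonneg (qFiltB input_space t rest).length
        have : min k (c + ((qFiltB input_space t rest).length : Int)) = c := by omega
        have h2 : min k (c + ((s :: qFiltB input_space t rest).length : Int)) = c := by
          simp; omega
        simp [this]
        omega
    · -- s does not qualify
      have hstep : stepB input_space k s (t, c, a) = (t, c, a) := by
        simp only [stepB]; rw [if_neg]; intro ⟨_, h2⟩
        apply hQ
        by_cases hpos : input_space > 0 <;> simp_all
      rw [List.foldl_cons, hstep, ih c a h0 hck, hq, if_neg hQ]

lemma pick_eq (input_space t : Int) (spaces : List Int)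
    (h : ∃ s ∈ spaces, if input_space > 0 then s ≥ t else s < t) :
    (PySem.List.pyGet? (innerLoopA input_space t spaces 0 []) (-1)).getD 0 =
      ((spaces.foldl (fun x s => stepB input_space (max |input_space| 1) s x)
          (t, (0 : Int), (none : Option Int))).2.2).getD 0 := by
  have hk1 : (1:Int) ≤ max |input_space| 1 := le_max_right _ _
  have hA := innerA_eq input_space t spaces [] 0 (by simp) (by simpa using hk1)
  have hB := foldB_char input_space t (max |input_space| 1) rfl spaces 0 none (by norm_num)
      (by omega)
  simp only [sub_zero] at hB
  have hne : qFiltB input_space t spaces ≠ [] := by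
    obtain ⟨s, hs, hcond⟩ := h
    apply List.ne_nil_of_mem (a := s)
    simp only [qFiltB, List.mem_filter, hs, true_and]
    by_cases hpos : input_space > 0 <;> simp_all
  have htne : (qFiltB input_space t spaces).take (max |input_space| 1).toNat ≠ [] := by
    cases hq : qFiltB input_space t spaces with
    | nil => exact absurd hq hne
    | cons y ys =>
      have h1 : (max |input_space| 1).toNat = ((max |input_space| 1).toNat - 1) + 1 := by omega
      rw [h1]; simp
  rw [hA, hB, qFilt_eq_qFiltB]
  simp only [List.nil_append, PySem.List.pyGet?_neg_one, List.length_nil, Nat.sub_zero,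
    if_neg htne]

-- ===== VERDICT (by name: the statement is the Claim_ definition above) =====
theorem final_indexes1_spec : Claim_equal_final_indexes1 := by
  intro targets spaces input_space _hdom hpre
  unfold Spec_final_indexes1 final_indexes1 final_indexes1_alt
  rw [PySem.List.foldl_append_singleton_eq_map,
    foldl_map_comm (stepB input_space (max |input_space| 1)) spaces, List.map_map,
    List.map_map]
  simp only [List.nil_append]
  apply List.map_congr_left
  intro t ht
  simpa [Function.comp] using pick_eq input_space t spaces (hpre t ht)
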